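-- pv_equiv track=rewrite | github.com/ekeilty17/Project_Euler | P068.py | MagicTriangle
-- ===== SOURCE A (Python) =====
-- def MagicTriangle(S):
--     # Below is NOT the numbers, they are the indeces of the nodes
--     #
--     #   0
--     #    \
--     #     1
--     #    / \
--     #   4 _ 2 _ 3
--     #  /
--     # 5
--     #
--     # define leaf as a node that branches solution_sets from the base
--     # to convert this to a unique list, start with the lowest index leaf
--     #   and make a truple going into the base
--     # This becomes: (0, 1, 2), (3, 2, 4), (5, 2, 1)
--     #
--     # given that they all need to sum up to S
--     #   0 is completely free
--     #   1 is free but can't be 0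
--     #   2 is forced
--     #   3 is free but can't be 0, 1, or 2
--     #   4 is forced
--     #   5 is forced
--     #
--     # a final retriction is that T0 < T3 and T0 < T5 to make solutions unique
--     solution_sets = []
--     for T0 in range(1, 7):
--         for T1 in range(1, 7):
--             T2 = S - T1 - T0
--             for T3 in range(1, 7):
--                 T4 = S - T2 - T3
--                 T5 = S - T1 - T4
--                 # This ensures my solutions are unique
--                 if T0 > T5 or T0 > T3:
--                     continue
--                 if list(sorted([T0, T1, T2, T3, T4, T5])) == list(range(1, 7)):
--                     if T0 + T1 + T2 == T3 + T2 + T4 == T1 + T4 + T5 == S: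
--                         solution_sets.append( [(T0, T1, T2), (T3, T2, T4), (T5, T4, T1)] )
--     return solution_sets
-- ===== SOURCE B (Python) =====
-- def MagicTriangle(S):
--     # Generate-and-test over all permutations of 1..6 (lexicographic order),
--     # keeping the same uniqueness guard and side-sum test as the original.
--     def perms(xs):
--         if not xs:
--             return [[]]
--         return [[x] + p for x in xs for p in perms([y for y in xs if y != x])]
--     solution_sets = []
--     for T0, T1, T2, T3, T4, T5 in perms(list(range(1, 7))):
--         if T0 > T5 or T0 > T3:
--             continue
--         if T0 + T1 + T2 == S and T3 + T2 + T4 == S and T1 + T4 + T5 == S: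
--             solution_sets.append([(T0, T1, T2), (T3, T2, T4), (T5, T4, T1)])
--     return solution_sets
-- ===== Notes on version B (the rewrite author's own statement) =====
-- stated objective: alternative
-- what changed: Replaces A's constructive derivation of the forced nodes (T2, T4, T5 computed from S inside three nested range loops plus a sorted-equals-range uniqueness check) with pure generate-and-test over all permutations of 1..6 produced by a recursive generator, checking only the three side sums.
import Mathlib
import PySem

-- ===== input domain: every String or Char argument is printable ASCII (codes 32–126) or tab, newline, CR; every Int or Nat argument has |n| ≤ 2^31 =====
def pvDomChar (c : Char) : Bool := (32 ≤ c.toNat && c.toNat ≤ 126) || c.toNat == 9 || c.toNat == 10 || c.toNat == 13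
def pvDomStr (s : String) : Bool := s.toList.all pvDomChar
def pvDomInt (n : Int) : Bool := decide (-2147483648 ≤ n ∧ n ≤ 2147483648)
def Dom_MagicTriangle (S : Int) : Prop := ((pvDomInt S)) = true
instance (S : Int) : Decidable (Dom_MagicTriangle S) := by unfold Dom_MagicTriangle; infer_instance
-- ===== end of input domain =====

-- B replaces A's constructive derivation of the forced nodes with a generate-and-test
-- over all permutations of 1..6 (alternative algorithm, same output order).

-- ===== PORT A =====
def MagicTriangle (S : Int) : List (List (Int × Int × Int)) :=
  (PySem.List.pyRange 1 7 1).foldl (fun acc T0 =>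
    (PySem.List.pyRange 1 7 1).foldl (fun acc T1 =>
      let T2 := S - T1 - T0
      (PySem.List.pyRange 1 7 1).foldl (fun acc T3 =>
        let T4 := S - T2 - T3
        let T5 := S - T1 - T4
        if T0 > T5 ∨ T0 > T3 then acc
        else if PySem.List.sorted [T0, T1, T2, T3, T4, T5] (fun x => x) = PySem.List.pyRange 1 7 1 then
          if T0 + T1 + T2 = T3 + T2 + T4 ∧ T3 + T2 + T4 = T1 + T4 + T5 ∧ T1 + T4 + T5 = S then
            acc ++ [[(T0, T1, T2), (T3, T2, T4), (T5, T4, T1)]]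
          else acc
        else acc) acc) acc) []

-- ===== PORT B =====
-- recursive permutation generator of Source B (fuel = list length; itertools order)
def pvPerms : Nat → List Int → List (List Int)
  | _, [] => [[]]
  | 0, _ :: _ => []
  | n + 1, x0 :: rest =>
      (x0 :: rest).flatMap (fun x =>
        (pvPerms n ((x0 :: rest).filter (fun y => y ≠ x))).map (fun p => x :: p))

def MagicTriangle_alt (S : Int) : List (List (Int × Int × Int)) :=
  (pvPerms 6 [1, 2, 3, 4, 5, 6]).foldl (fun acc p =>
    match p with
    | [T0, T1, T2, T3, T4, T5] =>
      if T0 > T5 ∨ T0 > T3 then acc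
      else if T0 + T1 + T2 = S ∧ T3 + T2 + T4 = S ∧ T1 + T4 + T5 = S then
        acc ++ [[(T0, T1, T2), (T3, T2, T4), (T5, T4, T1)]]
      else acc
    | _ => acc) []

-- ===== PRECONDITION & SPEC =====
def Spec_MagicTriangle (S : Int) (out : List (List (Int × Int × Int))) : Prop := out = MagicTriangle_alt S
instance (S : Int) (out : List (List (Int × Int × Int))) : Decidable (Spec_MagicTriangle S out) := by unfold Spec_MagicTriangle; infer_instance

-- ===== CLAIM (what is proved, stated in full; the proofs are below) =====
def Claim_equal_MagicTriangle : Prop := ∀ (S : Int), Dom_MagicTriangle S → Spec_MagicTriangle S (MagicTriangle S)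

-- ===== LEMMAS AND PROOFS =====

/-- A fold whose body fixes the accumulator on every list element returns the accumulator. -/
lemma pv_foldl_fix {α β : Type} (f : β → α → β) (l : List α)
    (h : ∀ acc x, x ∈ l → f acc x = acc) : ∀ acc, l.foldl f acc = acc := by
  induction l with
  | nil => intro _; rfl
  | cons a t ih =>
      intro acc
      rw [List.foldl_cons, h acc a (by simp)]
      exact ih (fun acc x hx => h acc x (by simp [hx])) acc

/-- Every element of a generated permutation comes from the source list. -/
lemma pvPerms_mem : ∀ (n : Nat) (xs p : List Int), p ∈ pvPerms n xs → ∀ y ∈ p, y ∈ xs := by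
  intro n
  induction n with
  | zero =>
      intro xs p hp y hy
      cases xs with
      | nil => simp [pvPerms] at hp; subst hp; simp at hy
      | cons a as => simp [pvPerms] at hp
  | succ n ih =>
      intro xs p hp y hy
      cases xs with
      | nil => simp [pvPerms] at hp; subst hp; simp at hy
      | cons a as =>
          simp only [pvPerms, List.mem_flatMap, List.mem_map] at hp
          obtain ⟨x, hx, q, hq, rfl⟩ := hp
          rcases List.mem_cons.mp hy with rfl | hyq
          · exact hx
          · have := ih _ _ hq y hyq
            exact (List.mem_filter.mp this).1

lemma pv_A_empty (S : Int) (h : S < 3 ∨ 18 < S) : MagicTriangle S = [] := by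
  unfold MagicTriangle
  refine pv_foldl_fix _ _ ?_ []
  intro acc T0 hT0
  refine pv_foldl_fix _ _ ?_ acc
  intro acc1 T1 hT1
  refine pv_foldl_fix _ _ ?_ acc1
  intro acc2 T3 hT3
  have hb0 : (1 : Int) ≤ T0 ∧ T0 < 7 := (PySem.List.mem_pyRange_one).mp hT0
  have hb1 : (1 : Int) ≤ T1 ∧ T1 < 7 := (PySem.List.mem_pyRange_one).mp hT1
  dsimp only
  split_ifs with hg hs hsum
  · rfl
  · exfalso
    have hm : (S - T1 - T0) ∈ PySem.List.pyRange 1 7 1 := by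
      rw [← hs, PySem.List.mem_sorted]; simp
    have := (PySem.List.mem_pyRange_one).mp hm
    omega
  · rfl
  · rfl

lemma pv_B_empty (S : Int) (h : S < 3 ∨ 18 < S) : MagicTriangle_alt S = [] := by
  unfold MagicTriangle_alt
  refine pv_foldl_fix _ _ ?_ []
  intro acc p hp
  have hmem := pvPerms_mem 6 _ p hp
  match p with
  | [T0, T1, T2, T3, T4, T5] =>
    have h0 : (1:Int) ≤ T0 ∧ T0 ≤ 6 := by have := hmem T0 (by simp); simp at this; omega
    have h1 : (1:Int) ≤ T1 ∧ T1 ≤ 6 := by have := hmem T1 (by simp); simp at this; omega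
    have h2 : (1:Int) ≤ T2 ∧ T2 ≤ 6 := by have := hmem T2 (by simp); simp at this; omega
    dsimp only
    split_ifs with hg hsum
    · rfl
    · exfalso; omega
    · rfl
  | [] => rfl
  | [_] => rfl
  | [_, _] => rfl
  | [_, _, _] => rfl
  | [_, _, _, _] => rfl
  | [_, _, _, _, _] => rfl
  | _ :: _ :: _ :: _ :: _ :: _ :: _ :: _ => rfl

-- ===== VERDICT (by name: the statement is the Claim_ definition above) =====
set_option maxRecDepth 100000 in
theorem MagicTriangle_spec : Claim_equal_MagicTriangle := by
  intro S _
  unfold Spec_MagicTriangle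
  by_cases h : 3 ≤ S ∧ S ≤ 18
  · obtain ⟨h1, h2⟩ := h
    interval_cases S <;> decide
  · rw [pv_A_empty S (by omega), pv_B_empty S (by omega)]
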